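-- pv_equiv track=rewrite | github.com/Katherine623/value-iteration | app.py | build_policy_matrix
-- ===== SOURCE A (Python) =====
-- def build_policy_matrix(n, policy, end_state, obstacle_set, action_symbols):
--     matrix = [['' for _ in range(n)] for _ in range(n)]
--     for r in range(n):
--         for c in range(n):
--             if (r, c) in obstacle_set:
--                 matrix[r][c] = 'X'
--             elif [r, c] == end_state:
--                 matrix[r][c] = 'G'
--             elif (r, c) in policy:
--                 matrix[r][c] = action_symbols[policy[(r, c)]]
--     return matrix
-- ===== SOURCE B (Python) =====
-- def build_policy_matrix(n, policy, end_state, obstacle_set, action_symbols):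
--     matrix = [['' for _ in range(n)] for _ in range(n)]
--     for (r, c), act in policy.items():
--         if 0 <= r < n and 0 <= c < n and (r, c) not in obstacle_set and [r, c] != end_state:
--             matrix[r][c] = action_symbols[act]
--     if len(end_state) == 2:
--         r, c = end_state
--         if 0 <= r < n and 0 <= c < n:
--             matrix[r][c] = 'G'
--     for r, c in obstacle_set:
--         if 0 <= r < n and 0 <= c < n:
--             matrix[r][c] = 'X'
--     return matrix
-- ===== Notes on version B (the rewrite author's own statement) =====
-- stated objective: alternative
-- what changed: A scans all n*n cells testing each against the obstacle set, the end state and the policy dict; B allocates the blank n*n matrix once and fills it sparsely in reverse priority order (policy writes, then the goal cell, then obstacle cells, later passes overwriting), touching only the cells the sparse inputs name.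
import Mathlib
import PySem

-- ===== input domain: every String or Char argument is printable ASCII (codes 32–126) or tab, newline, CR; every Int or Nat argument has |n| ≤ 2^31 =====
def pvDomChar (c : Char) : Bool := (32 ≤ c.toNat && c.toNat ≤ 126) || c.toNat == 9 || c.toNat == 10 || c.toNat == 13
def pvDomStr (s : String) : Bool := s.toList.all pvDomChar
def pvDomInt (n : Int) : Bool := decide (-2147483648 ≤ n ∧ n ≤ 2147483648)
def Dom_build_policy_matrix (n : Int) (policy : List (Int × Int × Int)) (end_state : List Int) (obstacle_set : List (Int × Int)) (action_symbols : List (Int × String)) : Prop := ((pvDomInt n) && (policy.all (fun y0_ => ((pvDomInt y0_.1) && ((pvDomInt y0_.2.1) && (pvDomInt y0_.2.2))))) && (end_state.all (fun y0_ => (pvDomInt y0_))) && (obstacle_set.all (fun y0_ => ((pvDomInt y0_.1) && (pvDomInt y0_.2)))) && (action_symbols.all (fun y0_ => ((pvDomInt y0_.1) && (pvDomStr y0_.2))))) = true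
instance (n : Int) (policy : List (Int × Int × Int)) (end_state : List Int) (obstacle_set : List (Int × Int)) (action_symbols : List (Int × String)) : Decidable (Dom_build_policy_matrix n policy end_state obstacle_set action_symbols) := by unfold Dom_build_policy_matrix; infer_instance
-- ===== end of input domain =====

-- B fills the blank matrix from the sparse inputs (policy writes, then the goal cell, then
-- obstacle cells, later passes overwriting) instead of testing every cell against every input.

-- ===== PORT A =====
-- first-match lookup in the policy dict (key (r, c)); none = key absent
def pvPolGet? (l : List (Int × Int × Int)) (r c : Int) : Option Int :=
  match l with
  | [] => none
  | (r', c', a) :: t => if r' = r ∧ c' = c then some a else pvPolGet? t r c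

-- action_symbols[k]: first-match dict lookup; "" stands for the KeyError case (excluded by Pre_)
def pvSymGetD (l : List (Int × String)) (k : Int) : String :=
  match l with
  | [] => ""
  | (k', v) :: t => if k' = k then v else pvSymGetD t k

def build_policy_matrix (n : Int) (policy : List (Int × Int × Int)) (end_state : List Int) (obstacle_set : List (Int × Int)) (action_symbols : List (Int × String)) : List (List String) :=
  (PySem.List.pyRange 0 n 1).map (fun r =>
    (PySem.List.pyRange 0 n 1).map (fun c =>
      if obstacle_set.contains (r, c) then "X"
      else if end_state = [r, c] then "G"
      else match pvPolGet? policy r c with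
        | some a => pvSymGetD action_symbols a
        | none => ""))

-- ===== PORT B =====
-- matrix[r][c] = v; callers guard 0 ≤ r < n and 0 ≤ c < n
def pvSet2 (m : List (List String)) (r c : Int) (v : String) : List (List String) :=
  m.set r.toNat ((m.getD r.toNat []).set c.toNat v)

def build_policy_matrix_alt (n : Int) (policy : List (Int × Int × Int)) (end_state : List Int) (obstacle_set : List (Int × Int)) (action_symbols : List (Int × String)) : List (List String) :=
  let m0 := (PySem.List.pyRange 0 n 1).map (fun _ => (PySem.List.pyRange 0 n 1).map (fun _ => ""))
  let m1 := policy.foldl (fun m y =>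
      if 0 ≤ y.1 ∧ y.1 < n ∧ 0 ≤ y.2.1 ∧ y.2.1 < n ∧ ¬ obstacle_set.contains (y.1, y.2.1) = true ∧ end_state ≠ [y.1, y.2.1]
      then pvSet2 m y.1 y.2.1 (pvSymGetD action_symbols y.2.2) else m) m0
  let m2 := match end_state with
    | [r, c] => if 0 ≤ r ∧ r < n ∧ 0 ≤ c ∧ c < n then pvSet2 m1 r c "G" else m1
    | _ => m1
  obstacle_set.foldl (fun m y =>
      if 0 ≤ y.1 ∧ y.1 < n ∧ 0 ≤ y.2 ∧ y.2 < n then pvSet2 m y.1 y.2 "X" else m) m2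

-- ===== PRECONDITION & SPEC =====
-- Pre_ excludes (a) inputs on which A raises KeyError (the action of a policy entry at an
-- in-bounds, non-obstacle, non-goal cell missing from action_symbols) and (b) association
-- lists carrying duplicate dict keys in policy or action_symbols, on which the
-- dict-as-list first-match order is an accident of the encoding (a real Python dict cannot
-- carry duplicate keys).
def Pre_build_policy_matrix (n : Int) (policy : List (Int × Int × Int)) (end_state : List Int) (obstacle_set : List (Int × Int)) (action_symbols : List (Int × String)) : Prop :=
  (policy.map (fun y => (y.1, y.2.1))).Nodup ∧
  (action_symbols.map Prod.fst).Nodup ∧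
  ∀ y ∈ policy, (0 ≤ y.1 ∧ y.1 < n ∧ 0 ≤ y.2.1 ∧ y.2.1 < n ∧ ¬ obstacle_set.contains (y.1, y.2.1) = true ∧ end_state ≠ [y.1, y.2.1]) → y.2.2 ∈ action_symbols.map Prod.fst
instance (n : Int) (policy : List (Int × Int × Int)) (end_state : List Int) (obstacle_set : List (Int × Int)) (action_symbols : List (Int × String)) : Decidable (Pre_build_policy_matrix n policy end_state obstacle_set action_symbols) := by unfold Pre_build_policy_matrix; infer_instance

def pvWitness_build_policy_matrix : Int × (List (Int × Int × Int)) × List Int × (List (Int × Int)) × (List (Int × String)) :=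
  (2, [(0, 0, 1)], [1, 1], [(0, 1)], [(1, "^")])

def Spec_build_policy_matrix (n : Int) (policy : List (Int × Int × Int)) (end_state : List Int) (obstacle_set : List (Int × Int)) (action_symbols : List (Int × String)) (out : List (List String)) : Prop := out = build_policy_matrix_alt n policy end_state obstacle_set action_symbols
instance (n : Int) (policy : List (Int × Int × Int)) (end_state : List Int) (obstacle_set : List (Int × Int)) (action_symbols : List (Int × String)) (out : List (List String)) : Decidable (Spec_build_policy_matrix n policy end_state obstacle_set action_symbols out) := by unfold Spec_build_policy_matrix; infer_instance

-- ===== CLAIM (what is proved, stated in full; the proofs are below) =====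
def Claim_equal_build_policy_matrix : Prop := ∀ (n : Int) (policy : List (Int × Int × Int)) (end_state : List Int) (obstacle_set : List (Int × Int)) (action_symbols : List (Int × String)), Dom_build_policy_matrix n policy end_state obstacle_set action_symbols → Pre_build_policy_matrix n policy end_state obstacle_set action_symbols → Spec_build_policy_matrix n policy end_state obstacle_set action_symbols (build_policy_matrix n policy end_state obstacle_set action_symbols)

-- ===== LEMMAS AND PROOFS =====

-- the n×n matrix whose (r, c) cell is f r c
def pvMapMat (n : Int) (f : Int → Int → String) : List (List String) :=
  (PySem.List.pyRange 0 n 1).map (fun r => (PySem.List.pyRange 0 n 1).map (fun c => f r c))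

-- pointwise functional update
def pvUpd (f : Int → Int → String) (r c : Int) (v : String) : Int → Int → String :=
  fun r' c' => if r' = r ∧ c' = c then v else f r' c'

theorem pvMapMat_congr (n : Int) (f g : Int → Int → String)
    (h : ∀ r c, 0 ≤ r → r < n → 0 ≤ c → c < n → f r c = g r c) :
    pvMapMat n f = pvMapMat n g := by
  unfold pvMapMat
  apply List.map_congr_left
  intro r hr
  apply List.map_congr_left
  intro c hc
  rw [PySem.List.mem_pyRange_one] at hr hc
  exact h r c hr.1 hr.2 hc.1 hc.2

theorem pvSet2_mapMat (n : Int) (f : Int → Int → String) (r c : Int) (v : String)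
    (hr0 : 0 ≤ r) (hrn : r < n) (hc0 : 0 ≤ c) (hcn : c < n) :
    pvSet2 (pvMapMat n f) r c v = pvMapMat n (pvUpd f r c v) := by
  have hrN : r.toNat < n.toNat := by omega
  have hcN : c.toNat < n.toNat := by omega
  have hmr : max r 0 = r := by omega
  have hmc : max c 0 = c := by omega
  unfold pvSet2 pvMapMat
  apply List.ext_getElem?
  intro i
  simp only [List.getElem?_set, List.getElem?_map, PySem.List.getElem?_pyRange_one,
    List.length_map, PySem.List.length_pyRange_one, List.getD, Int.sub_zero, Int.zero_add,
    Int.toNat_of_nonneg hr0]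
  by_cases hi : r.toNat = i
  · subst hi
    simp only [if_pos hrN, Option.map_some, Option.getD_some]
    apply congrArg some
    apply List.ext_getElem?
    intro j
    simp only [List.getElem?_set, List.getElem?_map, PySem.List.getElem?_pyRange_one,
      Int.sub_zero, Int.zero_add, List.length_map, PySem.List.length_pyRange_one]
    by_cases hj : c.toNat = j
    · subst hj
      simp [hcN, pvUpd, Int.toNat_of_nonneg hc0, Int.toNat_of_nonneg hr0]
    · have hj' : (j : Int) ≠ c := by omega
      simp [hj, pvUpd, hj', hmr]
  · have hi' : (i : Int) ≠ r := by omega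
    simp [hi, pvUpd, hi']

-- B's policy pass on a pvMapMat matrix is a functional fold
theorem pvPolicyFoldMat (n : Int) (end_state : List Int) (obstacle_set : List (Int × Int))
    (action_symbols : List (Int × String)) (l : List (Int × Int × Int)) (f : Int → Int → String) :
    l.foldl (fun m y =>
      if 0 ≤ y.1 ∧ y.1 < n ∧ 0 ≤ y.2.1 ∧ y.2.1 < n ∧ ¬ obstacle_set.contains (y.1, y.2.1) = true ∧ end_state ≠ [y.1, y.2.1]
      then pvSet2 m y.1 y.2.1 (pvSymGetD action_symbols y.2.2) else m) (pvMapMat n f)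
    = pvMapMat n (l.foldl (fun g y =>
      if 0 ≤ y.1 ∧ y.1 < n ∧ 0 ≤ y.2.1 ∧ y.2.1 < n ∧ ¬ obstacle_set.contains (y.1, y.2.1) = true ∧ end_state ≠ [y.1, y.2.1]
      then pvUpd g y.1 y.2.1 (pvSymGetD action_symbols y.2.2) else g) f) := by
  induction l generalizing f with
  | nil => rfl
  | cons y t ih =>
    simp only [List.foldl_cons]
    by_cases hg : 0 ≤ y.1 ∧ y.1 < n ∧ 0 ≤ y.2.1 ∧ y.2.1 < n ∧ ¬ obstacle_set.contains (y.1, y.2.1) = true ∧ end_state ≠ [y.1, y.2.1]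
    · rw [if_pos hg, if_pos hg, pvSet2_mapMat n f y.1 y.2.1 _ hg.1 hg.2.1 hg.2.2.1 hg.2.2.2.1, ih]
    · rw [if_neg hg, if_neg hg, ih]

-- if the key (r, c) does not occur in l, the functional fold leaves the cell alone
theorem pvPolicyFoldFun_notMem (n : Int) (end_state : List Int) (obstacle_set : List (Int × Int))
    (action_symbols : List (Int × String)) (l : List (Int × Int × Int)) (f : Int → Int → String)
    (r c : Int) (hnm : (r, c) ∉ l.map (fun y => (y.1, y.2.1))) :
    (l.foldl (fun g y =>
      if 0 ≤ y.1 ∧ y.1 < n ∧ 0 ≤ y.2.1 ∧ y.2.1 < n ∧ ¬ obstacle_set.contains (y.1, y.2.1) = true ∧ end_state ≠ [y.1, y.2.1]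
      then pvUpd g y.1 y.2.1 (pvSymGetD action_symbols y.2.2) else g) f) r c = f r c := by
  induction l generalizing f with
  | nil => rfl
  | cons y t ih =>
    simp only [List.map_cons, List.mem_cons, not_or] at hnm
    simp only [List.foldl_cons]
    rw [ih _ hnm.2]
    by_cases hg : 0 ≤ y.1 ∧ y.1 < n ∧ 0 ≤ y.2.1 ∧ y.2.1 < n ∧ ¬ obstacle_set.contains (y.1, y.2.1) = true ∧ end_state ≠ [y.1, y.2.1]
    · rw [if_pos hg]
      unfold pvUpd
      rw [if_neg]
      intro h
      exact hnm.1 (by simp [h.1.symm, h.2.symm])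
    · rw [if_neg hg]

-- value of the functional policy fold at (r, c), under Nodup keys
theorem pvPolicyFoldFun (n : Int) (end_state : List Int) (obstacle_set : List (Int × Int))
    (action_symbols : List (Int × String)) (l : List (Int × Int × Int))
    (hnd : (l.map (fun y => (y.1, y.2.1))).Nodup) (f : Int → Int → String) (r c : Int) :
    (l.foldl (fun g y =>
      if 0 ≤ y.1 ∧ y.1 < n ∧ 0 ≤ y.2.1 ∧ y.2.1 < n ∧ ¬ obstacle_set.contains (y.1, y.2.1) = true ∧ end_state ≠ [y.1, y.2.1]
      then pvUpd g y.1 y.2.1 (pvSymGetD action_symbols y.2.2) else g) f) r c =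
    match pvPolGet? l r c with
    | some a => if 0 ≤ r ∧ r < n ∧ 0 ≤ c ∧ c < n ∧ ¬ obstacle_set.contains (r, c) = true ∧ end_state ≠ [r, c]
                then pvSymGetD action_symbols a else f r c
    | none => f r c := by
  induction l generalizing f with
  | nil => rfl
  | cons y t ih =>
    obtain ⟨r', c', a⟩ := y
    simp only [List.map_cons, List.nodup_cons] at hnd
    simp only [List.foldl_cons]
    by_cases hk : r' = r ∧ c' = c
    · obtain ⟨hk1, hk2⟩ := hk
      subst hk1; subst hk2
      rw [pvPolicyFoldFun_notMem n end_state obstacle_set action_symbols t _ r' c' hnd.1]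
      have hp : pvPolGet? ((r', c', a) :: t) r' c' = some a := by simp [pvPolGet?]
      rw [hp]
      simp only []
      by_cases hg : 0 ≤ r' ∧ r' < n ∧ 0 ≤ c' ∧ c' < n ∧ ¬ obstacle_set.contains (r', c') = true ∧ end_state ≠ [r', c']
      · rw [if_pos hg, if_pos hg]
        unfold pvUpd
        rw [if_pos ⟨rfl, rfl⟩]
      · rw [if_neg hg, if_neg hg]
    · rw [ih hnd.2]
      have hp' : pvPolGet? ((r', c', a) :: t) r c = pvPolGet? t r c := by
        simp only [pvPolGet?, if_neg hk]
      rw [hp']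
      cases hp : pvPolGet? t r c with
      | some b =>
        simp only []
        by_cases hgc : 0 ≤ r ∧ r < n ∧ 0 ≤ c ∧ c < n ∧ ¬ obstacle_set.contains (r, c) = true ∧ end_state ≠ [r, c]
        · rw [if_pos hgc, if_pos hgc]
        · rw [if_neg hgc, if_neg hgc]
          by_cases hg : 0 ≤ r' ∧ r' < n ∧ 0 ≤ c' ∧ c' < n ∧ ¬ obstacle_set.contains (r', c') = true ∧ end_state ≠ [r', c']
          · rw [if_pos hg]
            unfold pvUpd
            rw [if_neg (by intro h; exact hk ⟨h.1.symm, h.2.symm⟩)]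
          · rw [if_neg hg]
      | none =>
        simp only []
        by_cases hg : 0 ≤ r' ∧ r' < n ∧ 0 ≤ c' ∧ c' < n ∧ ¬ obstacle_set.contains (r', c') = true ∧ end_state ≠ [r', c']
        · rw [if_pos hg]
          unfold pvUpd
          rw [if_neg (by intro h; exact hk ⟨h.1.symm, h.2.symm⟩)]
        · rw [if_neg hg]

-- the obstacle pass on a pvMapMat matrix is a functional fold
theorem pvObstFoldMat (n : Int) (l : List (Int × Int)) (f : Int → Int → String) :
    l.foldl (fun m y =>
      if 0 ≤ y.1 ∧ y.1 < n ∧ 0 ≤ y.2 ∧ y.2 < n then pvSet2 m y.1 y.2 "X" else m) (pvMapMat n f)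
    = pvMapMat n (l.foldl (fun g y =>
      if 0 ≤ y.1 ∧ y.1 < n ∧ 0 ≤ y.2 ∧ y.2 < n then pvUpd g y.1 y.2 "X" else g) f) := by
  induction l generalizing f with
  | nil => rfl
  | cons y t ih =>
    simp only [List.foldl_cons]
    by_cases hg : 0 ≤ y.1 ∧ y.1 < n ∧ 0 ≤ y.2 ∧ y.2 < n
    · rw [if_pos hg, if_pos hg, pvSet2_mapMat n f y.1 y.2 _ hg.1 hg.2.1 hg.2.2.1 hg.2.2.2, ih]
    · rw [if_neg hg, if_neg hg, ih]

-- value of the functional obstacle fold at an in-bounds (r, c)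
theorem pvObstFoldFun (n : Int) (l : List (Int × Int)) (f : Int → Int → String) (r c : Int)
    (hr0 : 0 ≤ r) (hrn : r < n) (hc0 : 0 ≤ c) (hcn : c < n) :
    (l.foldl (fun g y =>
      if 0 ≤ y.1 ∧ y.1 < n ∧ 0 ≤ y.2 ∧ y.2 < n then pvUpd g y.1 y.2 "X" else g) f) r c =
    if (r, c) ∈ l then "X" else f r c := by
  induction l generalizing f with
  | nil => rfl
  | cons y t ih =>
    obtain ⟨y1, y2⟩ := y
    simp only [List.foldl_cons, List.mem_cons]
    rw [ih]
    by_cases hm : (r, c) ∈ t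
    · simp [hm]
    · by_cases he : (r, c) = (y1, y2)
      · have h1 : y1 = r := by injection he with ha hb; exact ha.symm
        have h2 : y2 = c := by injection he with ha hb; exact hb.symm
        subst h1; subst h2
        simp [hm, pvUpd, hr0, hrn, hc0, hcn]
      · have hor : ¬ ((r, c) = (y1, y2) ∨ (r, c) ∈ t) := fun h => h.elim he hm
        rw [if_neg hor, if_neg hm]
        by_cases hg : 0 ≤ y1 ∧ y1 < n ∧ 0 ≤ y2 ∧ y2 < n
        · have hne : ¬ (r = y1 ∧ c = y2) := fun h => he (by rw [h.1, h.2])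
          simp [hg, pvUpd, hne]
        · simp [hg]

-- the whole-matrix comparison, given a characterization of the cell function after
-- the policy and goal passes
theorem pvFinal (n : Int) (policy : List (Int × Int × Int)) (end_state : List Int)
    (obstacle_set : List (Int × Int)) (action_symbols : List (Int × String))
    (hnd : (policy.map (fun y => (y.1, y.2.1))).Nodup)
    (F2 : Int → Int → String)
    (hF2val : ∀ r c, 0 ≤ r → r < n → 0 ≤ c → c < n →
      F2 r c = if end_state = [r, c] then "G"
        else (policy.foldl (fun g y =>
          if 0 ≤ y.1 ∧ y.1 < n ∧ 0 ≤ y.2.1 ∧ y.2.1 < n ∧ ¬ obstacle_set.contains (y.1, y.2.1) = true ∧ end_state ≠ [y.1, y.2.1]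
          then pvUpd g y.1 y.2.1 (pvSymGetD action_symbols y.2.2) else g) (fun _ _ => "")) r c) :
    pvMapMat n (fun r c =>
      if obstacle_set.contains (r, c) = true then "X"
      else if end_state = [r, c] then "G"
      else match pvPolGet? policy r c with
        | some a => pvSymGetD action_symbols a
        | none => "")
    = obstacle_set.foldl (fun m y =>
        if 0 ≤ y.1 ∧ y.1 < n ∧ 0 ≤ y.2 ∧ y.2 < n then pvSet2 m y.1 y.2 "X" else m) (pvMapMat n F2) := by
  rw [pvObstFoldMat n obstacle_set F2]
  apply pvMapMat_congr
  intro r c hr0 hrn hc0 hcn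
  rw [pvObstFoldFun n obstacle_set F2 r c hr0 hrn hc0 hcn]
  by_cases hobs : (r, c) ∈ obstacle_set
  · rw [if_pos (by simpa using hobs), if_pos hobs]
  · rw [if_neg (by simpa using hobs), if_neg hobs]
    rw [hF2val r c hr0 hrn hc0 hcn]
    by_cases hend : end_state = [r, c]
    · rw [if_pos hend, if_pos hend]
    · rw [if_neg hend, if_neg hend]
      rw [pvPolicyFoldFun n end_state obstacle_set action_symbols policy hnd (fun _ _ => "") r c]
      cases hp : pvPolGet? policy r c with
      | some a =>
        simp only []
        rw [if_pos ⟨hr0, hrn, hc0, hcn, by simpa using hobs, hend⟩]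
      | none => rfl

-- ===== VERDICT (by name: the statement is the Claim_ definition above) =====
theorem build_policy_matrix_spec : Claim_equal_build_policy_matrix := by
  intro n policy end_state obstacle_set action_symbols _hdom hpre
  clear _hdom
  obtain ⟨hnd, -, -⟩ := hpre
  unfold Spec_build_policy_matrix build_policy_matrix build_policy_matrix_alt
  simp only []
  rw [show ((PySem.List.pyRange 0 n 1).map (fun _ => (PySem.List.pyRange 0 n 1).map (fun _ => ("" : String)))) = pvMapMat n (fun _ _ => "") from rfl]
  rw [pvPolicyFoldMat n end_state obstacle_set action_symbols policy (fun _ _ => "")]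
  rcases end_state with - | ⟨e1, - | ⟨e2, - | ⟨e3, rest⟩⟩⟩
  · exact pvFinal n policy [] obstacle_set action_symbols hnd _
      (fun r c _ _ _ _ => by rw [if_neg (by simp)])
  · exact pvFinal n policy [e1] obstacle_set action_symbols hnd _
      (fun r c _ _ _ _ => by rw [if_neg (by simp)])
  · -- end_state = [e1, e2]
    by_cases hb : 0 ≤ e1 ∧ e1 < n ∧ 0 ≤ e2 ∧ e2 < n
    · show _ = obstacle_set.foldl (fun m y =>
          if 0 ≤ y.1 ∧ y.1 < n ∧ 0 ≤ y.2 ∧ y.2 < n then pvSet2 m y.1 y.2 "X" else m)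
        (if 0 ≤ e1 ∧ e1 < n ∧ 0 ≤ e2 ∧ e2 < n then pvSet2 (pvMapMat n (policy.foldl (fun g y =>
              if 0 ≤ y.1 ∧ y.1 < n ∧ 0 ≤ y.2.1 ∧ y.2.1 < n ∧ ¬ obstacle_set.contains (y.1, y.2.1) = true ∧ [e1, e2] ≠ [y.1, y.2.1]
              then pvUpd g y.1 y.2.1 (pvSymGetD action_symbols y.2.2) else g) (fun _ _ => ""))) e1 e2 "G" else pvMapMat n (policy.foldl (fun g y =>
              if 0 ≤ y.1 ∧ y.1 < n ∧ 0 ≤ y.2.1 ∧ y.2.1 < n ∧ ¬ obstacle_set.contains (y.1, y.2.1) = true ∧ [e1, e2] ≠ [y.1, y.2.1]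
              then pvUpd g y.1 y.2.1 (pvSymGetD action_symbols y.2.2) else g) (fun _ _ => "")))
      rw [if_pos hb, pvSet2_mapMat n _ e1 e2 "G" hb.1 hb.2.1 hb.2.2.1 hb.2.2.2]
      refine pvFinal n policy [e1, e2] obstacle_set action_symbols hnd _ ?_
      intro r c hr0 hrn hc0 hcn
      unfold pvUpd
      by_cases he : r = e1 ∧ c = e2
      · rw [if_pos he, if_pos (by rw [he.1, he.2])]
      · rw [if_neg he, if_neg (by
          intro h
          simp only [List.cons.injEq, and_true] at h
          exact he ⟨h.1.symm, h.2.symm⟩)]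
    · show _ = obstacle_set.foldl (fun m y =>
          if 0 ≤ y.1 ∧ y.1 < n ∧ 0 ≤ y.2 ∧ y.2 < n then pvSet2 m y.1 y.2 "X" else m)
        (if 0 ≤ e1 ∧ e1 < n ∧ 0 ≤ e2 ∧ e2 < n then pvSet2 (pvMapMat n (policy.foldl (fun g y =>
              if 0 ≤ y.1 ∧ y.1 < n ∧ 0 ≤ y.2.1 ∧ y.2.1 < n ∧ ¬ obstacle_set.contains (y.1, y.2.1) = true ∧ [e1, e2] ≠ [y.1, y.2.1]
              then pvUpd g y.1 y.2.1 (pvSymGetD action_symbols y.2.2) else g) (fun _ _ => ""))) e1 e2 "G" else pvMapMat n (policy.foldl (fun g y =>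
              if 0 ≤ y.1 ∧ y.1 < n ∧ 0 ≤ y.2.1 ∧ y.2.1 < n ∧ ¬ obstacle_set.contains (y.1, y.2.1) = true ∧ [e1, e2] ≠ [y.1, y.2.1]
              then pvUpd g y.1 y.2.1 (pvSymGetD action_symbols y.2.2) else g) (fun _ _ => "")))
      rw [if_neg hb]
      refine pvFinal n policy [e1, e2] obstacle_set action_symbols hnd _ ?_
      intro r c hr0 hrn hc0 hcn
      rw [if_neg (by
        intro h
        simp only [List.cons.injEq, and_true] at h
        obtain ⟨h1, h2⟩ := h
        exact hb ⟨by omega, by omega, by omega, by omega⟩)]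
  · exact pvFinal n policy (e1 :: e2 :: e3 :: rest) obstacle_set action_symbols hnd _
      (fun r c _ _ _ _ => by rw [if_neg (by simp)])
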